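-- pv_equiv track=rewrite | github.com/xysdd/png | png/compress.py | len_code
-- ===== SOURCE A (Python) =====
-- def len_code(length):
--     if length == 258:
--         return 285, (0, 0)
--     elif length <= 10:
--         return 257 + (length - 3), (0, 0)
--     else:
--         for i in range(1, 6):
--             seg = (1 << (i + 2)) + 3
--             nseg = (1 << (i + 3)) + 3
--             if length < nseg:
--                 return 261 + i * 4 + ((length - seg) >> i), ((length - seg) & ((1 << i) - 1), i)
-- ===== SOURCE B (Python) =====
-- def len_code(length):
--     if length == 258:
--         return 285, (0, 0)
--     i = max(0, (length - 3).bit_length() - 3) if length > 3 else 0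
--     if i > 5:
--         return None
--     seg = (1 << (i + 2)) + 3
--     return 261 + i * 4 + ((length - seg) >> i), ((length - seg) & ((1 << i) - 1), i)
-- ===== Notes on version B (the rewrite author's own statement) =====
-- stated objective: simpler
-- what changed: Replaced the 1..5 segment-scanning loop (and the separate length<=10 branch) with a closed-form extra-bit count i = max(0, (length-3).bit_length()-3) and one formula.
-- outside the precondition, e.g. on len_code(259): A returns None, B returns None; on len_code(1000): A returns None, B returns None
import Mathlib
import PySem

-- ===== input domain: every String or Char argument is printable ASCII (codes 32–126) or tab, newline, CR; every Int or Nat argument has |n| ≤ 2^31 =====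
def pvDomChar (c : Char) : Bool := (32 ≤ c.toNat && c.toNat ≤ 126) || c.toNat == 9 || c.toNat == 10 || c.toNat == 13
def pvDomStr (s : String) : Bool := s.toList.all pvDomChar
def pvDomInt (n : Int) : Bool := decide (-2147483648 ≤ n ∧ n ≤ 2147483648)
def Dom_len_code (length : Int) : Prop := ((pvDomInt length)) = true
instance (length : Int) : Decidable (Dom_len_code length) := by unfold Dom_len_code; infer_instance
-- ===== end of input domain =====

-- B replaces A's 1..5 segment-scanning loop by a closed form: the extra-bit count is
-- max(0, (length-3).bit_length() - 3), and one formula then covers the small-length branch too.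
-- Objective: simpler (no loop); return value only.

-- ===== PORT A =====
-- the for-loop over range(1, 6); [] = loop exhausted, Python returns None (excluded by Pre_)
def lenLoop (length : Int) : List Int → Int × (Int × Int)
  | [] => (0, (0, 0))
  | i :: rest =>
      let seg : Int := 2 ^ (i + 2).toNat + 3          -- (1 << (i+2)) + 3
      let nseg : Int := 2 ^ (i + 3).toNat + 3         -- (1 << (i+3)) + 3
      if length < nseg then
        -- x >> i = floordiv x 2^i ; x & ((1<<i)-1) = mod x 2^i (exact, incl. negatives)
        (261 + i * 4 + PySem.Int.floordiv (length - seg) (2 ^ i.toNat),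
         (PySem.Int.mod (length - seg) (2 ^ i.toNat), i))
      else lenLoop length rest

def len_code (length : Int) : Int × (Int × Int) :=
  if length = 258 then (285, (0, 0))
  else if length ≤ 10 then (257 + (length - 3), (0, 0))
  else lenLoop length (PySem.List.pyRange 1 6 1)

-- ===== PORT B =====
def len_code_alt (length : Int) : Int × (Int × Int) :=
  if length = 258 then (285, (0, 0))
  else
    let i : Int := if length > 3 then max 0 ((PySem.Int.bitLength (length - 3) : Int) - 3) else 0
    if i > 5 then (0, (0, 0))                          -- Python returns None here (excluded by Pre_)
    else
      let seg : Int := 2 ^ (i + 2).toNat + 3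
      (261 + i * 4 + PySem.Int.floordiv (length - seg) (2 ^ i.toNat),
       (PySem.Int.mod (length - seg) (2 ^ i.toNat), i))

-- ===== PRECONDITION & SPEC =====
-- Pre_ excludes length ≥ 259, where A's loop exhausts and Python A returns None
-- (no value of the declared pair type); B returns None there as well.
def Pre_len_code (length : Int) : Prop := length ≤ 258
instance (length : Int) : Decidable (Pre_len_code length) := by unfold Pre_len_code; infer_instance
def pvWitness_len_code : Int := (100)

def Spec_len_code (length : Int) (out : Int × (Int × Int)) : Prop := out = len_code_alt length
instance (length : Int) (out : Int × (Int × Int)) : Decidable (Spec_len_code length out) := by unfold Spec_len_code; infer_instance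

-- ===== CLAIM (what is proved, stated in full; the proofs are below) =====
def Claim_equal_len_code : Prop := ∀ (length : Int), Dom_len_code length → Pre_len_code length → Spec_len_code length (len_code length)

-- ===== LEMMAS AND PROOFS =====

-- the small-length case: both sides reduce to (254 + length, (0, 0))
theorem len_code_small (length : Int) (h3 : length ≤ 3) :
    len_code length = len_code_alt length := by
  have h258 : length ≠ 258 := by omega
  have h10 : length ≤ 10 := by omega
  have hng : ¬ length > 3 := by omega
  have e7 : ((2:Int) ^ (((0:Int) + 2).toNat) + 3) = 7 := by decide
  have e1 : ((2:Int) ^ ((0:Int).toNat)) = 1 := by decide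
  simp only [len_code, len_code_alt, if_neg h258, if_pos h10, hng, if_false, e7, e1]
  rw [PySem.Int.floordiv_eq_ediv_of_pos (by norm_num), PySem.Int.mod_eq_emod_of_pos (by norm_num)]
  norm_num [Prod.ext_iff]
  omega

-- ===== VERDICT (by name: the statement is the Claim_ definition above) =====
set_option maxHeartbeats 4000000 in
theorem len_code_spec : Claim_equal_len_code := by
  intro length _ hpre
  show len_code length = len_code_alt length
  rcases le_or_gt length 3 with h | h
  · exact len_code_small length h
  · have hlo : (4 : Int) ≤ length := by omega
    have hhi : length ≤ 258 := hpre
    interval_cases length <;> decide
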